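-- pv_equiv track=rewrite | github.com/thealper2/codewars-solutions | 7-kyu/simple_fun_106_is_thue_morse.py | is_thue_morse
-- ===== SOURCE A (Python) =====
-- def is_thue_morse(seq):
--     if not seq:
--         return True
--
--     thue_morse = [0]
--     while len(thue_morse) < len(seq):
--         complement = [1 - bit for bit in thue_morse]
--         thue_morse += complement
--
--     return seq == thue_morse[:len(seq)]
-- ===== SOURCE B (Python) =====
-- def is_thue_morse(seq):
--     if not seq:
--         return True
--     tm = [bin(i).count('1') & 1 for i in range(len(seq))]
--     return seq == tm
-- ===== Notes on version B (the rewrite author's own statement) =====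
-- stated objective: simpler
-- what changed: Replaces the iterative doubling/complement construction of the Thue-Morse prefix with the closed-form per-index popcount-parity formula bin(i).count('1') & 1.
import Mathlib
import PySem

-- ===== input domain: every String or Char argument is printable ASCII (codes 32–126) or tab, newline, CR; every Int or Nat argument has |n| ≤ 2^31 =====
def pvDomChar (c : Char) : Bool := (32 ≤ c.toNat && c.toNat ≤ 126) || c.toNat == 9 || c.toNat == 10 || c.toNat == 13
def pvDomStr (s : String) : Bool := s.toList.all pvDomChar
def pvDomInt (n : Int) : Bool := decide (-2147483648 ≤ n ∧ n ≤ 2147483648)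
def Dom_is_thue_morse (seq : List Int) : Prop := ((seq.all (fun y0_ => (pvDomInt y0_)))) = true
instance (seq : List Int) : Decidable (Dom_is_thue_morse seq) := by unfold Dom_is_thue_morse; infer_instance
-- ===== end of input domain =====

-- B replaces A's doubling/complement construction with the closed-form popcount-parity formula (simpler).

-- ===== PORT A =====
-- the while loop: each pass appends the bitwise complement; fuel `f` only makes the
-- recursion total (length at least doubles each pass, so fuel = len(seq) always suffices)
def tmGrow : Nat → Nat → List Int → List Int
  | 0, _, tm => tm
  | f + 1, n, tm =>
    if tm.length < n then tmGrow f n (tm ++ tm.map (fun bit => 1 - bit)) else tm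

def is_thue_morse (seq : List Int) : Bool :=
  if seq.isEmpty then true
  else
    let thue_morse := tmGrow seq.length seq.length [0]
    decide (seq = thue_morse.take seq.length)

-- ===== PORT B =====
-- hand port of bin(i).count('1'): the number of 1 bits of i
def popcount : Nat → Nat
  | 0 => 0
  | n + 1 => (n + 1) % 2 + popcount ((n + 1) / 2)

def is_thue_morse_alt (seq : List Int) : Bool :=
  if seq.isEmpty then true
  else
    -- tm = [bin(i).count('1') & 1 for i in range(len(seq))]  (& 1 = % 2)
    decide (seq = (List.range seq.length).map (fun i => ((popcount i % 2 : Nat) : Int)))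

-- ===== PRECONDITION & SPEC =====
def Spec_is_thue_morse (seq : List Int) (out : Bool) : Prop := out = is_thue_morse_alt seq
instance (seq : List Int) (out : Bool) : Decidable (Spec_is_thue_morse seq out) := by unfold Spec_is_thue_morse; infer_instance

-- ===== CLAIM (what is proved, stated in full; the proofs are below) =====
def Claim_equal_is_thue_morse : Prop := ∀ (seq : List Int), Dom_is_thue_morse seq → Spec_is_thue_morse seq (is_thue_morse seq)

-- ===== LEMMAS AND PROOFS =====

-- the ideal Thue–Morse prefix of length n (B's comparison list)
def idealTM (n : Nat) : List Int := (List.range n).map (fun i => ((popcount i % 2 : Nat) : Int))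

theorem idealTM_length (n : Nat) : (idealTM n).length = n := by
  simp [idealTM]

theorem popcount_two_mul_add (i : Nat) (b : Nat) (hb : b < 2) :
    popcount (2 * i + b) = b + popcount i := by
  have hb2 : b = 0 ∨ b = 1 := by omega
  rcases hb2 with rfl | rfl
  · cases i with
    | zero => simp [popcount]
    | succ j =>
      have h : 2 * (j + 1) + 0 = (2 * j + 1) + 1 := by ring
      rw [h, popcount]
      have h1 : (2 * j + 1 + 1) % 2 = 0 := by omega
      have h2 : (2 * j + 1 + 1) / 2 = j + 1 := by omega
      rw [h1, h2]
  · have h : 2 * i + 1 = (2 * i) + 1 := rfl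
    rw [h, popcount]
    have h1 : (2 * i + 1) % 2 = 1 := by omega
    have h2 : (2 * i + 1) / 2 = i := by omega
    rw [h1, h2]

theorem popcount_pow_add (k i : Nat) (h : i < 2 ^ k) :
    popcount (2 ^ k + i) = popcount i + 1 := by
  induction k generalizing i with
  | zero =>
    interval_cases i
    show popcount 1 = popcount 0 + 1
    simp [popcount]
  | succ k ih =>
    have hsplit : 2 ^ (k + 1) + i = 2 * (2 ^ k + i / 2) + i % 2 := by
      have := Nat.div_add_mod i 2
      ring_nf
      omega
    have hi : i = 2 * (i / 2) + i % 2 := by omega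
    rw [hsplit, popcount_two_mul_add _ _ (Nat.mod_lt _ (by norm_num)),
        ih (i / 2) (by omega)]
    conv_rhs => rw [hi, popcount_two_mul_add _ _ (Nat.mod_lt _ (by norm_num))]
    omega

theorem idealTM_double (k : Nat) :
    idealTM (2 ^ (k + 1)) = idealTM (2 ^ k) ++ (idealTM (2 ^ k)).map (fun bit => 1 - bit) := by
  have h : 2 ^ (k + 1) = 2 ^ k + 2 ^ k := by ring
  rw [idealTM, h, List.range_add, List.map_append, idealTM, List.map_map]
  congr 1
  rw [List.map_map]
  apply List.map_congr_left
  intro i hi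
  simp only [List.mem_range] at hi
  simp only [Function.comp_apply]
  rw [popcount_pow_add k i hi]
  have := Nat.mod_lt (popcount i) (y := 2) (by norm_num)
  omega

theorem tmGrow_spec : ∀ (f k n : Nat), n ≤ 2 ^ k + f →
    ∃ k', tmGrow f n (idealTM (2 ^ k)) = idealTM (2 ^ k') ∧ n ≤ 2 ^ k' := by
  intro f
  induction f with
  | zero =>
    intro k n h
    exact ⟨k, rfl, by simpa using h⟩
  | succ f ih =>
    intro k n h
    rw [tmGrow]
    by_cases hlt : (idealTM (2 ^ k)).length < n
    · rw [if_pos hlt, ← idealTM_double]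
      apply ih (k + 1) n
      have : 1 ≤ 2 ^ k := Nat.one_le_two_pow
      have : 2 ^ (k + 1) = 2 ^ k + 2 ^ k := by ring
      omega
    · rw [if_neg hlt]
      rw [idealTM_length] at hlt
      exact ⟨k, rfl, by omega⟩

theorem idealTM_take (n m : Nat) (h : n ≤ m) : (idealTM m).take n = idealTM n := by
  simp [idealTM, ← List.map_take, List.take_range, Nat.min_eq_left h]

theorem idealTM_one : idealTM (2 ^ 0) = [0] := by
  simp [idealTM, popcount]

-- ===== VERDICT (by name: the statement is the Claim_ definition above) =====
theorem is_thue_morse_spec : Claim_equal_is_thue_morse := by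
  intro seq _
  unfold Spec_is_thue_morse is_thue_morse is_thue_morse_alt
  by_cases hemp : seq.isEmpty
  · simp [hemp]
  · rw [if_neg hemp, if_neg hemp]
    have hn : 1 ≤ seq.length := by
      cases seq with
      | nil => simp at hemp
      | cons a l => simp
    obtain ⟨k', heq, hk'⟩ := tmGrow_spec seq.length 0 seq.length (by omega)
    rw [idealTM_one] at heq
    show decide (seq = List.take seq.length (tmGrow seq.length seq.length [0])) = _
    rw [heq, idealTM_take _ _ hk']
    rfl
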